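-- pv_equiv track=rewrite | github.com/huzecong/nnlib | nnlib/utils/string.py | _get_name_pieces
-- ===== SOURCE A (Python) =====
-- from typing import List
--
-- def _get_name_pieces(name: str) -> List[str]:
--     if '_' in name:
--         # underscore
--         return [x.lower() for x in name.split('_')]
--     else:
--         # camelcase / capitalized
--         pos = [idx for idx, ch in enumerate(name) if ch.upper() == ch] + [len(name)]
--         if pos[0] != 0:
--             pos = [0] + pos
--         return [name[l:r].lower() for l, r in zip(pos[:-1], pos[1:])]
-- ===== SOURCE B (Python) =====
-- from typing import List
--
-- def _get_name_pieces(name: str) -> List[str]: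
--     if '_' in name:
--         # underscore
--         return [x.lower() for x in name.split('_')]
--     # camelcase / capitalized: one linear pass with a running buffer
--     pieces: List[str] = []
--     current = ""
--     for ch in name:
--         if ch.upper() == ch and current:
--             pieces.append(current.lower())
--             current = ch
--         else:
--             current += ch
--     if current:
--         pieces.append(current.lower())
--     return pieces
-- ===== Notes on version B (the rewrite author's own statement) =====
-- stated objective: simpler
-- what changed: The camelcase branch's boundary-index-list construction plus zip-of-slices is replaced by a single accumulator pass that keeps a running chunk buffer and flushes it at each boundary character.
import Mathlib
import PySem

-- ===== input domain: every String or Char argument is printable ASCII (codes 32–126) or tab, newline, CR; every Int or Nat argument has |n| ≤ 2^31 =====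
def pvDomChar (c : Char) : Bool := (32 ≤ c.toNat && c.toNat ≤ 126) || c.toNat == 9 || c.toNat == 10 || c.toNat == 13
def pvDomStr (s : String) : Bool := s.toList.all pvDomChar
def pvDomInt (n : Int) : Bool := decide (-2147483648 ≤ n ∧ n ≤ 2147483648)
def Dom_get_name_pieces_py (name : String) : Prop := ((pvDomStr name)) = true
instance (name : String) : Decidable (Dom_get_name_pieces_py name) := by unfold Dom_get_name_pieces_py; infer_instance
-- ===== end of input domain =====

-- B replaces A's boundary-index-list + zip-of-slices camelcase split by a single
-- accumulator pass with a running buffer (objective: simpler, same cost).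

-- ===== PORT A =====
-- literal transliteration of A: underscore branch splits on '_'; camel branch builds the
-- index list `pos` (boundary = ch.upper() == ch), prepends 0 if needed, and slices.
-- `pos0.headD 0` reads pos[0]: pos0 always ends with [len], hence is nonempty, so this is exact.
def get_name_pieces_py (name : String) : List String :=
  let cs := name.toList
  if PySem.Chars.isIn ['_'] cs then
    (PySem.Chars.splitOn cs ['_']).map (fun x => String.ofList (PySem.Chars.lower x))
  else
    let pos0 : List Int :=
      ((PySem.List.enumerate cs).filter (fun p => PySem.Chars.upperChar p.2 == p.2)).map (·.1)
        ++ [(cs.length : Int)]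
    let pos : List Int := if pos0.headD 0 ≠ 0 then 0 :: pos0 else pos0
    (pos.dropLast.zip pos.tail).map
      (fun lr => String.ofList (PySem.Chars.lower (PySem.List.slice cs (some lr.1) (some lr.2))))

-- ===== PORT B =====
-- literal transliteration of B: one fold keeping (pieces, current buffer), then a final flush.
def get_name_pieces_py_alt (name : String) : List String :=
  let cs := name.toList
  if PySem.Chars.isIn ['_'] cs then
    (PySem.Chars.splitOn cs ['_']).map (fun x => String.ofList (PySem.Chars.lower x))
  else
    let st := cs.foldl
      (fun (st : List (List Char) × List Char) c =>
        if PySem.Chars.upperChar c == c && !st.2.isEmpty then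
          (st.1 ++ [PySem.Chars.lower st.2], [c])
        else
          (st.1, st.2 ++ [c]))
      ([], [])
    (if !st.2.isEmpty then st.1 ++ [PySem.Chars.lower st.2] else st.1).map String.ofList

-- ===== PRECONDITION & SPEC =====
def Spec_get_name_pieces_py (name : String) (out : List String) : Prop := out = get_name_pieces_py_alt name
instance (name : String) (out : List String) : Decidable (Spec_get_name_pieces_py name out) := by unfold Spec_get_name_pieces_py; infer_instance

-- ===== CLAIM (what is proved, stated in full; the proofs are below) =====
def Claim_equal_get_name_pieces_py : Prop := ∀ (name : String), Dom_get_name_pieces_py name → Spec_get_name_pieces_py name (get_name_pieces_py name)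

-- ===== LEMMAS AND PROOFS =====

-- the shared boundary predicate
def pvBd (c : Char) : Bool := PySem.Chars.upperChar c == c

-- reference recursion: split `cur ++ rest` after the running chunk `cur`
def pvGo : List Char → List Char → List (List Char)
  | cur, [] => [cur]
  | cur, c :: rest => if pvBd c then cur :: pvGo [c] rest else pvGo (cur ++ [c]) rest

def pvCamel : List Char → List (List Char)
  | [] => []
  | c :: rest => pvGo [c] rest

-- A-side abstractions
def pvBidx (cs : List Char) : List Int :=
  ((PySem.List.enumerate cs).filter (fun p => PySem.Chars.upperChar p.2 == p.2)).map (·.1)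

def pvPos (cs : List Char) : List Int :=
  let pos0 := pvBidx cs ++ [(cs.length : Int)]
  if pos0.headD 0 ≠ 0 then 0 :: pos0 else pos0

def pvChunksA (cs : List Char) : List (List Char) :=
  ((pvPos cs).zip (pvPos cs).tail).map (fun lr => PySem.List.slice cs (some lr.1) (some lr.2))

lemma pvZipDropLast {α : Type} (l : List α) : l.dropLast.zip l.tail = l.zip l.tail := by
  induction l with
  | nil => rfl
  | cons a t ih =>
    cases t with
    | nil => rfl
    | cons b t' =>
      show (a :: (b::t').dropLast).zip (b :: t') = _
      simp only [List.zip_cons_cons, List.tail_cons]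
      exact congrArg _ ih

lemma pvEnumAppend {α : Type} (cs : List α) (c : α) (s : Int) :
    PySem.List.enumerate (cs ++ [c]) s = PySem.List.enumerate cs s ++ [(s + cs.length, c)] := by
  induction cs generalizing s with
  | nil => simp [PySem.List.enumerate]
  | cons a t ih =>
    simp only [List.cons_append, PySem.List.enumerate, ih, List.length_cons, List.cons_append]
    have : s + 1 + (t.length : Int) = s + ((t.length : Int) + 1) := by ring
    push_cast
    rw [this]

lemma pvEnumMem {α : Type} (cs : List α) (s : Int) :
    ∀ p ∈ PySem.List.enumerate cs s, s ≤ p.1 ∧ p.1 < s + cs.length := by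
  induction cs generalizing s with
  | nil => simp [PySem.List.enumerate]
  | cons a t ih =>
    intro p hp
    simp only [PySem.List.enumerate, List.mem_cons] at hp
    rcases hp with h | h
    · subst h; simp only [List.length_cons]; push_cast; omega
    · have := ih (s+1) p h
      simp only [List.length_cons]
      push_cast
      omega

lemma pvBidxAppend (cs : List Char) (c : Char) :
    pvBidx (cs ++ [c]) = pvBidx cs ++ (if pvBd c then [(cs.length : Int)] else []) := by
  unfold pvBidx
  rw [pvEnumAppend, List.filter_append, List.map_append]
  congr 1
  by_cases h : PySem.Chars.upperChar c = c
  · have hb : (PySem.Chars.upperChar c == c) = true := beq_iff_eq.mpr h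
    simp [List.filter, pvBd, h]
  · have hb : (PySem.Chars.upperChar c == c) = false := beq_eq_false_iff_ne.mpr h
    simp [List.filter, hb, pvBd]

lemma pvBidxMem (cs : List Char) : ∀ x ∈ pvBidx cs, 0 ≤ x ∧ x < cs.length := by
  intro x hx
  unfold pvBidx at hx
  simp only [List.mem_map, List.mem_filter] at hx
  obtain ⟨p, ⟨hp, _⟩, rfl⟩ := hx
  have := pvEnumMem cs 0 p hp
  omega

-- adjusting (prepending 0 when pos[0] ≠ 0) commutes with appending a new last position
lemma pvAdjAppend (p0 : List Int) (z : Int) (h : p0 ≠ []) :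
    (if (p0 ++ [z]).headD 0 ≠ 0 then 0 :: (p0 ++ [z]) else p0 ++ [z]) =
      (if p0.headD 0 ≠ 0 then 0 :: p0 else p0) ++ [z] := by
  cases p0 with
  | nil => exact absurd rfl h
  | cons a t => by_cases ha : a ≠ 0 <;> simp [ha]

lemma pvPosAppendBd (cs : List Char) (c : Char) (hb : pvBd c = true) :
    pvPos (cs ++ [c]) = pvPos cs ++ [((cs.length : Int) + 1)] := by
  unfold pvPos
  rw [pvBidxAppend, hb]
  have hz : (((cs ++ [c]).length : Nat) : Int) = (cs.length : Int) + 1 := by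
    simp
  simp only [hz]
  exact pvAdjAppend (pvBidx cs ++ [(cs.length : Int)]) _ (by simp)

lemma pvPosAppendNotBd (cs : List Char) (c : Char) (h : cs ≠ []) (hb : pvBd c = false) :
    pvPos (cs ++ [c]) = (pvPos cs).dropLast ++ [((cs.length : Int) + 1)] := by
  unfold pvPos
  rw [pvBidxAppend, hb]
  have hz : (((cs ++ [c]).length : Nat) : Int) = (cs.length : Int) + 1 := by
    simp
  have hlen : (0 : Int) < cs.length := by
    cases cs with
    | nil => exact absurd rfl h
    | cons a t => simp
  simp only [if_neg (by simp : ¬ (false : Bool) = true), List.append_nil, hz]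
  cases hq : pvBidx cs with
  | nil =>
    simp only [List.nil_append, List.headD_cons]
    rw [if_pos (by omega : ¬ ((cs.length : Int) + 1) = 0), if_pos (by omega : ¬ (cs.length : Int) = 0)]
    rfl
  | cons a t =>
    simp only [List.cons_append, List.headD_cons]
    by_cases ha : a = 0
    · rw [if_neg (by omega : ¬ ¬ a = 0), if_neg (by omega : ¬ ¬ a = 0)]
      rw [show a :: (t ++ [(cs.length : Int)]) = (a :: t) ++ [(cs.length : Int)] from rfl,
        List.dropLast_concat]
      rfl
    · rw [if_pos (by omega : ¬ a = 0), if_pos (by omega : ¬ a = 0)]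
      rw [show (0 : Int) :: a :: (t ++ [(cs.length : Int)]) = (0 :: a :: t) ++ [(cs.length : Int)] from rfl,
        List.dropLast_concat]
      rfl

lemma pvPosLast (cs : List Char) (h : cs ≠ []) :
    ∃ q, pvPos cs = q ++ [(cs.length : Int)] ∧ q ≠ [] ∧ ∀ x ∈ q, 0 ≤ x ∧ x < cs.length := by
  have hlen : (0 : Int) < cs.length := by
    cases cs with
    | nil => exact absurd rfl h
    | cons a t => simp
  have hmem := pvBidxMem cs
  unfold pvPos
  cases hq : pvBidx cs with
  | nil =>
    refine ⟨[0], ?_, by simp, by intro x hx; simp at hx; omega⟩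
    simp only [List.nil_append, List.headD_cons]
    rw [if_pos (by omega : ¬ (cs.length : Int) = 0)]
    rfl
  | cons a t =>
    rw [hq] at hmem
    simp only [List.cons_append, List.headD_cons]
    by_cases ha : a = 0
    · refine ⟨a :: t, ?_, by simp, hmem⟩
      rw [if_neg (by omega : ¬ ¬ a = 0)]
      rfl
    · refine ⟨0 :: a :: t, ?_, by simp, ?_⟩
      · rw [if_pos (by omega : ¬ a = 0)]
        rfl
      · intro x hx
        rcases List.mem_cons.mp hx with rfl | hx
        · omega
        · exact hmem x hx

lemma pvZipConsecAppend {α : Type} (l : List α) (y d : α) (h : l ≠ []) :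
    (l ++ [y]).zip (l ++ [y]).tail = l.zip l.tail ++ [(l.getLastD d, y)] := by
  induction l with
  | nil => exact absurd rfl h
  | cons a t ih =>
    cases t with
    | nil => rfl
    | cons b t' =>
      have ih' := ih (by simp)
      show ((a :: ((b :: t') ++ [y])).zip ((b :: t') ++ [y])) = _
      rw [show ((b :: t') ++ [y]) = b :: (t' ++ [y]) from rfl, List.zip_cons_cons]
      show (a, b) :: (((b :: t') ++ [y]).zip ((b :: t') ++ [y]).tail) = _
      rw [ih']
      rfl

lemma pvSliceStable (xs : List Char) (c : Char) (l r : Int) (hl : 0 ≤ l) (hl2 : l ≤ xs.length)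
    (hr0 : 0 ≤ r) (hr : r ≤ xs.length) :
    PySem.List.slice (xs ++ [c]) (some l) (some r) = PySem.List.slice xs (some l) (some r) := by
  obtain ⟨a, rfl⟩ := Int.eq_ofNat_of_zero_le hl
  obtain ⟨b, rfl⟩ := Int.eq_ofNat_of_zero_le hr0
  rw [PySem.List.slice_natCast, PySem.List.slice_natCast]
  have ha : a ≤ xs.length := by exact_mod_cast hl2
  rw [List.drop_append_of_le_length ha]
  rw [List.take_append_of_le_length (by simp [List.length_drop]; omega)]

lemma pvSliceGrow (xs : List Char) (c : Char) (l : Int) (hl : 0 ≤ l) (hr : l ≤ xs.length) :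
    PySem.List.slice (xs ++ [c]) (some l) (some ((xs.length : Int) + 1)) =
      PySem.List.slice xs (some l) (some (xs.length : Int)) ++ [c] := by
  obtain ⟨a, rfl⟩ := Int.eq_ofNat_of_zero_le hl
  have ha : a ≤ xs.length := by exact_mod_cast hr
  rw [show ((xs.length : Int) + 1) = ((xs.length + 1 : Nat) : Int) by push_cast; ring,
    PySem.List.slice_natCast,
    show ((xs.length : Int)) = ((xs.length : Nat) : Int) by rfl,
    PySem.List.slice_natCast]
  rw [List.drop_append_of_le_length ha]
  rw [List.take_of_length_le (by simp [List.length_drop]; omega),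
    List.take_of_length_le (by simp [List.length_drop])]

lemma pvGoNe (rest : List Char) : ∀ cur, pvGo cur rest ≠ [] := by
  induction rest with
  | nil => intro cur; simp [pvGo]
  | cons c t ih =>
    intro cur
    by_cases h : pvBd c <;> simp [pvGo, h, ih]

lemma pvGetLastQCons {α : Type} (a : α) (l : List α) (h : l ≠ []) :
    (a :: l).getLast? = l.getLast? := by
  cases l with
  | nil => exact absurd rfl h
  | cons b t => simp [List.getLast?_cons_cons]

lemma pvGoAppend (rest : List Char) : ∀ (cur : List Char) (c : Char),
    pvGo cur (rest ++ [c]) =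
      if pvBd c then pvGo cur rest ++ [[c]]
      else (pvGo cur rest).dropLast ++ [(pvGo cur rest).getLastD [] ++ [c]] := by
  induction rest with
  | nil =>
    intro cur c
    by_cases h : pvBd c <;> simp [pvGo, h]
  | cons d t ih =>
    intro cur c
    show pvGo cur (d :: (t ++ [c])) = _
    have hne := pvGoNe t [d]
    by_cases hd : pvBd d <;> by_cases hc : pvBd c <;>
      simp [pvGo, hd, hc, ih, List.dropLast_cons_of_ne_nil hne,
        pvGetLastQCons _ _ hne]

lemma pvGetLastDMem {α : Type} (l : List α) (d : α) (h : l ≠ []) : l.getLastD d ∈ l := by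
  induction l with
  | nil => exact absurd rfl h
  | cons a t ih =>
    cases t with
    | nil => simp
    | cons b t' => exact List.mem_cons_of_mem a (ih (by simp))

lemma pvCamelAppend (l : List Char) (c : Char) (h : l ≠ []) :
    pvCamel (l ++ [c]) =
      if pvBd c then pvCamel l ++ [[c]]
      else (pvCamel l).dropLast ++ [(pvCamel l).getLastD [] ++ [c]] := by
  cases l with
  | nil => exact absurd rfl h
  | cons d rest =>
    show pvGo [d] (rest ++ [c]) = _
    exact pvGoAppend rest [d] c

lemma pvChunksABase (c : Char) : pvChunksA [c] = [[c]] := by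
  have hb := pvBidxAppend [] c
  simp only [List.nil_append] at hb
  have hpos : pvPos [c] = [0, 1] := by
    unfold pvPos
    rw [hb]
    by_cases hc : pvBd c
    · simp [hc, pvBidx, PySem.List.enumerate]
    · simp [hc, pvBidx, PySem.List.enumerate]
  unfold pvChunksA
  rw [hpos]
  simp only [List.tail_cons, List.zip_cons_cons, List.zip_nil_right, List.map_cons, List.map_nil]
  rfl

lemma pvChunksAEqCamel (cs : List Char) : pvChunksA cs = pvCamel cs := by
  induction cs using List.reverseRecOn with
  | nil => rfl
  | append_singleton l c ih =>
    rcases eq_or_ne l [] with rfl | hl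
    · rw [List.nil_append, pvChunksABase]
      rfl
    · obtain ⟨q, hq, hqne, hqmem⟩ := pvPosLast l hl
      have hposne : pvPos l ≠ [] := by rw [hq]; simp
      have hlastpos : (pvPos l).getLastD 0 = (l.length : Int) := by
        rw [hq, List.getLastD_concat]
      rw [pvCamelAppend l c hl, ← ih]
      by_cases hc : pvBd c
      · -- boundary: a new one-char chunk is appended
        rw [if_pos hc]
        unfold pvChunksA
        rw [pvPosAppendBd l c hc, pvZipConsecAppend (pvPos l) _ 0 hposne, hlastpos,
          List.map_append]
        congr 1
        · apply List.map_congr_left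
          intro p hp
          obtain ⟨hp1, hp2⟩ := List.of_mem_zip hp
          have hp2' : p.2 ∈ pvPos l := List.mem_of_mem_tail hp2
          have hb1 : 0 ≤ p.1 ∧ p.1 ≤ (l.length : Int) := by
            rw [hq] at hp1
            rcases List.mem_append.mp hp1 with h' | h'
            · have := hqmem _ h'; omega
            · simp at h'; omega
          have hb2 : 0 ≤ p.2 ∧ p.2 ≤ (l.length : Int) := by
            rw [hq] at hp2'
            rcases List.mem_append.mp hp2' with h' | h'
            · have := hqmem _ h'; omega
            · simp at h'; omega
          exact pvSliceStable l c p.1 p.2 hb1.1 hb1.2 hb2.1 hb2.2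
        · rw [List.map_singleton, pvSliceGrow l c _ (by positivity) le_rfl]
          rw [show PySem.List.slice l (some (l.length : Int)) (some (l.length : Int)) = [] by
            rw [show ((l.length : Nat) : Int) = ((l.length : Nat) : Int) from rfl,
              PySem.List.slice_natCast]
            simp]
          rfl
      · -- no boundary: the character joins the last chunk
        rw [if_neg hc]
        have hlastq : q.getLastD 0 ∈ q := pvGetLastDMem q 0 hqne
        have hlq : 0 ≤ q.getLastD 0 ∧ q.getLastD 0 < (l.length : Int) := hqmem _ hlastq
        unfold pvChunksA
        rw [pvPosAppendNotBd l c hl (by simpa using hc), hq, List.dropLast_concat,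
          pvZipConsecAppend q _ 0 hqne, List.map_append,
          pvZipConsecAppend q _ 0 hqne, List.map_append]
        simp only [List.map_singleton]
        rw [List.dropLast_concat, List.getLastD_concat]
        congr 1
        · apply List.map_congr_left
          intro p hp
          obtain ⟨hp1, hp2⟩ := List.of_mem_zip hp
          have hp2' : p.2 ∈ q := List.mem_of_mem_tail hp2
          have hb1 := hqmem _ hp1
          have hb2 := hqmem _ hp2'
          exact pvSliceStable l c p.1 p.2 hb1.1 (le_of_lt hb1.2) hb2.1 (le_of_lt hb2.2)
        · rw [pvSliceGrow l c _ hlq.1 (le_of_lt hlq.2)]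

def pvStep (st : List (List Char) × List Char) (c : Char) : List (List Char) × List Char :=
  if PySem.Chars.upperChar c == c && !st.2.isEmpty then
    (st.1 ++ [PySem.Chars.lower st.2], [c])
  else
    (st.1, st.2 ++ [c])

def pvFlush (st : List (List Char) × List Char) : List (List Char) :=
  if !st.2.isEmpty then st.1 ++ [PySem.Chars.lower st.2] else st.1

lemma pvFoldB (rest : List Char) :
    ∀ (acc : List (List Char)) (cur : List Char), cur ≠ [] →
    pvFlush (rest.foldl pvStep (acc, cur)) = acc ++ (pvGo cur rest).map PySem.Chars.lower := by
  induction rest with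
  | nil =>
    intro acc cur h
    simp [pvGo, pvFlush, List.isEmpty_eq_false_iff.mpr h]
  | cons c t ih =>
    intro acc cur h
    rw [List.foldl_cons]
    by_cases hc : pvBd c
    · have hc' : PySem.Chars.upperChar c = c := by simpa [pvBd] using hc
      have hstep : pvStep (acc, cur) c = (acc ++ [PySem.Chars.lower cur], [c]) := by
        simp [pvStep, hc', List.isEmpty_eq_false_iff.mpr h]
      rw [hstep, ih _ [c] (by simp)]
      simp [pvGo, hc]
    · have hc' : ¬ PySem.Chars.upperChar c = c := by simpa [pvBd] using hc
      have hstep : pvStep (acc, cur) c = (acc, cur ++ [c]) := by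
        simp [pvStep, hc']
      rw [hstep, ih _ (cur ++ [c]) (by simp)]
      simp [pvGo, hc]

-- ===== VERDICT (by name: the statement is the Claim_ definition above) =====
theorem get_name_pieces_py_spec : Claim_equal_get_name_pieces_py := by
  intro name _
  unfold Spec_get_name_pieces_py get_name_pieces_py get_name_pieces_py_alt
  by_cases h : PySem.Chars.isIn ['_'] name.toList
  · rw [if_pos h, if_pos h]
  · rw [if_neg h, if_neg h]
    show ((pvPos name.toList).dropLast.zip (pvPos name.toList).tail).map
        (fun lr => String.ofList
          (PySem.Chars.lower (PySem.List.slice name.toList (some lr.1) (some lr.2)))) =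
      (pvFlush (name.toList.foldl pvStep ([], []))).map String.ofList
    rw [pvZipDropLast]
    have hA : ((pvPos name.toList).zip (pvPos name.toList).tail).map
        (fun lr => String.ofList
          (PySem.Chars.lower (PySem.List.slice name.toList (some lr.1) (some lr.2)))) =
        (pvChunksA name.toList).map (fun L => String.ofList (PySem.Chars.lower L)) := by
      unfold pvChunksA
      rw [List.map_map]
      rfl
    rw [hA, pvChunksAEqCamel]
    cases hcs : name.toList with
    | nil => rfl
    | cons d rest =>
      rw [List.foldl_cons, show pvStep ([], []) d = ([], [d]) by simp [pvStep],
        pvFoldB rest [] [d] (by simp)]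
      show (pvGo [d] rest).map (fun L => String.ofList (PySem.Chars.lower L)) =
        ([] ++ (pvGo [d] rest).map PySem.Chars.lower).map String.ofList
      rw [List.nil_append, List.map_map]
      rfl
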